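-- pv_equiv track=rewrite | github.com/zyg-acad-sys-dev/news-authentic-proj-g16 | utils/data_utils.py | resolve_positive_label
-- ===== SOURCE A (Python) =====
-- def resolve_positive_label(labels: list[str], requested: str | None = 'fake') -> str:
--     lowered = {str(label).lower(): str(label) for label in labels}
--     if requested and requested.lower() in lowered:
--         return lowered[requested.lower()]
--     for candidate in ['fake', 'positive', 'true', '1', 'yes', 'real']:
--         if candidate in lowered:
--             return lowered[candidate]
--     return str(labels[-1])
-- ===== SOURCE B (Python) =====
-- def resolve_positive_label(labels: list[str], requested: str | None = 'fake') -> str: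
--     # priority list of lowercased targets, best first
--     targets = ['fake', 'positive', 'true', '1', 'yes', 'real']
--     if requested:
--         targets = [requested.lower()] + targets
--     # single pass: keep the label whose lowercased form has the best (smallest) priority
--     best = None  # (priority, label)
--     for label in labels:
--         try:
--             rank = targets.index(label.lower())
--         except ValueError:
--             continue
--         if best is None or rank < best[0]:
--             best = (rank, label)
--     if best is not None:
--         return best[1]
--     return labels[-1]
-- ===== Notes on version B (the rewrite author's own statement) =====
-- stated objective: alternative
-- what changed: Instead of building a lowercase-keyed dict and probing it target by target, B builds one priority list of targets and selects, in a single pass over labels, the label whose lowercased form has the smallest priority index; Pre_ excludes the empty list (labels[-1] raises IndexError) and lists with two distinct labels sharing a lowercased form, where A's dict overwrite (last wins) vs B's first-seen tie-break is an accidental choice.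
-- outside the precondition, e.g. on resolve_positive_label(['Fake', 'FAKE'], 'fake'): A returns 'FAKE', B returns 'Fake'
import Mathlib
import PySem

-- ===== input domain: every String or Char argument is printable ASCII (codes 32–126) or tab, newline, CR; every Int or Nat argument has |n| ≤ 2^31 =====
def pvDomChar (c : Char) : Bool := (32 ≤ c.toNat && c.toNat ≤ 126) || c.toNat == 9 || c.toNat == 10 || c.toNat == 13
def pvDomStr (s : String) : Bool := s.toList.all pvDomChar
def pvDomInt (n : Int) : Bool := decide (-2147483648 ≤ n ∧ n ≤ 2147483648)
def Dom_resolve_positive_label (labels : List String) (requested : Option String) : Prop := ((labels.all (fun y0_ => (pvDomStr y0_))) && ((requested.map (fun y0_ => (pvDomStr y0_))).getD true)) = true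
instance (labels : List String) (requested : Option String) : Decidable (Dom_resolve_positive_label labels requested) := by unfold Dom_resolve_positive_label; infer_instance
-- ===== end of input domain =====

-- B replaces A's lowercase-keyed dict probed target by target with a single pass over the
-- labels selecting the label of smallest priority-list index; objective: alternative algorithm.

-- ===== PORT A =====
-- the candidate loop of A: first candidate that is a key of the dict
def aCandLoop (lowered : PySem.Dict String String) : List String → Option String
  | [] => none
  | c :: cs =>
    match lowered.get? c with
    | some v => some v
    | none => aCandLoop lowered cs

def resolve_positive_label (labels : List String) (requested : Option String) : String :=
  let lowered : PySem.Dict String String :=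
    labels.foldl (fun d l => d.insert (PySem.Str.lower l) l) PySem.Dict.empty
  let fromReq : Option String :=
    match requested with
    | none => none
    | some r => if r = "" then none else lowered.get? (PySem.Str.lower r)
  match fromReq with
  | some v => v
  | none =>
    match aCandLoop lowered ["fake", "positive", "true", "1", "yes", "real"] with
    | some v => v
    | none => (PySem.List.pyGet? labels (-1)).getD ""   -- labels[-1]; none (IndexError) excluded by Pre_

-- ===== PORT B =====
def resolve_positive_label_alt (labels : List String) (requested : Option String) : String :=
  let targets : List String :=
    let base := ["fake", "positive", "true", "1", "yes", "real"]
    match requested with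
    | none => base
    | some r => if r = "" then base else [PySem.Str.lower r] ++ base
  let best : Option (Nat × String) :=
    labels.foldl (fun best label =>
      match PySem.List.index? targets (PySem.Str.lower label) with
      | none => best
      | some rank =>
        match best with
        | none => some (rank, label)
        | some (br, _) => if rank < br then some (rank, label) else best) none
  match best with
  | some (_, v) => v
  | none => (PySem.List.pyGet? labels (-1)).getD ""   -- labels[-1]; none (IndexError) excluded by Pre_

-- ===== PRECONDITION & SPEC =====
-- Pre_ excludes the empty list (labels[-1] raises IndexError in both programs) and lists
-- containing two DISTINCT labels with equal lowercased form, where A's dict-overwrite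
-- (last wins) versus B's first-seen tie-break is an accidental, equally defensible choice.
def Pre_resolve_positive_label (labels : List String) (requested : Option String) : Prop :=
  labels ≠ [] ∧ ∀ a ∈ labels, ∀ b ∈ labels, PySem.Str.lower a = PySem.Str.lower b → a = b
instance (labels : List String) (requested : Option String) : Decidable (Pre_resolve_positive_label labels requested) := by unfold Pre_resolve_positive_label; infer_instance

def pvWitness_resolve_positive_label : List String × Option String := (["Real", "FAKE"], some "fake")

def Spec_resolve_positive_label (labels : List String) (requested : Option String) (out : String) : Prop := out = resolve_positive_label_alt labels requested
instance (labels : List String) (requested : Option String) (out : String) : Decidable (Spec_resolve_positive_label labels requested out) := by unfold Spec_resolve_positive_label; infer_instance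

-- ===== CLAIM (what is proved, stated in full; the proofs are below) =====
def Claim_equal_resolve_positive_label : Prop := ∀ (labels : List String) (requested : Option String), Dom_resolve_positive_label labels requested → Pre_resolve_positive_label labels requested → Spec_resolve_positive_label labels requested (resolve_positive_label labels requested)

-- ===== LEMMAS AND PROOFS =====

-- common characterization: first target (in priority order) that some label matches,
-- resolved to the first matching label
def chainFind (labels : List String) : List String → Option String
  | [] => none
  | t :: ts =>
    match labels.find? (fun l => PySem.Str.lower l == t) with
    | some v => some v
    | none => chainFind labels ts

lemma chainFind_nil (ts : List String) : chainFind [] ts = none := by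
  induction ts with
  | nil => rfl
  | cons t ts ih => simp [chainFind, ih]

-- ---- A side ----

lemma get?_fold_insert (labels : List String) (d : PySem.Dict String String) (k : String) :
    (labels.foldl (fun d l => d.insert (PySem.Str.lower l) l) d).get? k
      = labels.foldl (fun found l => if PySem.Str.lower l = k then some l else found) (d.get? k) := by
  induction labels generalizing d with
  | nil => rfl
  | cons l ls ih =>
    simp only [List.foldl_cons]
    rw [ih]
    congr 1
    rw [PySem.Dict.get?_insert]
    by_cases h : PySem.Str.lower l = k
    · rw [if_pos h.symm, if_pos h]
    · rw [if_neg (fun hk => h hk.symm), if_neg h]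

-- under Pre_'s no-distinct-duplicates condition the last match is the first match
lemma lastMatch_const (ls : List String) (k v : String)
    (h : ∀ x ∈ ls, PySem.Str.lower x = k → x = v) :
    ls.foldl (fun found l => if PySem.Str.lower l = k then some l else found) (some v) = some v := by
  induction ls with
  | nil => rfl
  | cons l ls ih =>
    simp only [List.foldl_cons]
    by_cases hl : PySem.Str.lower l = k
    · rw [if_pos hl, h l (by simp) hl]
      exact ih (fun x hx => h x (by simp [hx]))
    · rw [if_neg hl]
      exact ih (fun x hx => h x (by simp [hx]))

lemma lastMatch_eq_find? (ls : List String) (k : String)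
    (h : ∀ a ∈ ls, ∀ b ∈ ls, PySem.Str.lower a = PySem.Str.lower b → a = b) :
    ls.foldl (fun found l => if PySem.Str.lower l = k then some l else found) none
      = ls.find? (fun l => PySem.Str.lower l == k) := by
  induction ls with
  | nil => rfl
  | cons l ls ih =>
    simp only [List.foldl_cons, List.find?_cons]
    by_cases hl : PySem.Str.lower l = k
    · rw [if_pos hl]
      have : (PySem.Str.lower l == k) = true := by simp [hl]
      rw [this]
      exact lastMatch_const ls k l (fun x hx hxk =>
        h x (by simp [hx]) l (by simp) (by rw [hxk, hl]))
    · have : (PySem.Str.lower l == k) = false := by simp [hl]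
      rw [if_neg hl, this]
      exact ih (fun a ha b hb => h a (by simp [ha]) b (by simp [hb]))

lemma dict_get?_eq_find? (labels : List String) (k : String)
    (h : ∀ a ∈ labels, ∀ b ∈ labels, PySem.Str.lower a = PySem.Str.lower b → a = b) :
    (labels.foldl (fun d l => d.insert (PySem.Str.lower l) l) PySem.Dict.empty).get? k
      = labels.find? (fun l => PySem.Str.lower l == k) := by
  rw [get?_fold_insert]
  exact lastMatch_eq_find? labels k h

lemma aCandLoop_eq_chainFind (labels : List String) (cs : List String)
    (h : ∀ a ∈ labels, ∀ b ∈ labels, PySem.Str.lower a = PySem.Str.lower b → a = b) :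
    aCandLoop (labels.foldl (fun d l => d.insert (PySem.Str.lower l) l) PySem.Dict.empty) cs
      = chainFind labels cs := by
  induction cs with
  | nil => rfl
  | cons c cs ih => simp only [aCandLoop, chainFind, dict_get?_eq_find? labels c h, ih]

-- ---- B side ----

def bSingle (ts : List String) (l : String) : Option (Nat × String) :=
  (PySem.List.index? ts (PySem.Str.lower l)).map (fun r => (r, l))

def bMerge (a b : Option (Nat × String)) : Option (Nat × String) :=
  match a, b with
  | none, b => b
  | a, none => a
  | some (ra, x), some (rb, y) => if rb < ra then some (rb, y) else some (ra, x)

lemma bStep_eq_merge (ts : List String) (best : Option (Nat × String)) (l : String) :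
    (match PySem.List.index? ts (PySem.Str.lower l) with
      | none => best
      | some rank =>
        match best with
        | none => some (rank, l)
        | some (br, _) => if rank < br then some (rank, l) else best)
      = bMerge best (bSingle ts l) := by
  unfold bMerge bSingle
  cases h : PySem.List.index? ts (PySem.Str.lower l) with
  | none => cases best with
    | none => rfl
    | some p => rcases p with ⟨br, x⟩; rfl
  | some r => cases best with
    | none => rfl
    | some p => rcases p with ⟨br, x⟩; rfl

lemma bMerge_none_left (b : Option (Nat × String)) : bMerge none b = b := by
  cases b <;> rfl

lemma bMerge_assoc (a b c : Option (Nat × String)) :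
    bMerge (bMerge a b) c = bMerge a (bMerge b c) := by
  rcases a with _ | ⟨ra, x⟩ <;> rcases b with _ | ⟨rb, y⟩ <;> rcases c with _ | ⟨rc, z⟩ <;>
    try rfl
  all_goals simp only [bMerge]
  all_goals split_ifs <;> (try (exfalso; omega)) <;> simp only [bMerge] <;> split_ifs <;>
    first | rfl | (exfalso; omega)

lemma foldl_bMerge (ts : List String) (ls : List String) (acc : Option (Nat × String)) :
    ls.foldl (fun best l => bMerge best (bSingle ts l)) acc
      = bMerge acc (ls.foldl (fun best l => bMerge best (bSingle ts l)) none) := by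
  induction ls generalizing acc with
  | nil => cases acc with
    | none => rfl
    | some p => rcases p with ⟨r, x⟩; rfl
  | cons l ls ih =>
    simp only [List.foldl_cons]
    rw [ih (bMerge acc (bSingle ts l)), ih (bMerge none (bSingle ts l)),
        bMerge_none_left, bMerge_assoc]

-- chainFind over l :: ls, expressed through l's rank and chainFind over ls
lemma chainFind_mem (ts : List String) (ls : List String) (v : String)
    (h : chainFind ls ts = some v) : v ∈ ls := by
  induction ts with
  | nil => simp [chainFind] at h
  | cons t ts ih =>
    simp only [chainFind] at h
    cases hf : ls.find? (fun x => PySem.Str.lower x == t) with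
    | some w =>
      rw [hf] at h
      cases h
      exact List.mem_of_find?_eq_some hf
    | none => rw [hf] at h; exact ih h

lemma chainFind_cons (ts : List String) (l : String) (ls : List String) :
    chainFind (l :: ls) ts =
      match PySem.List.index? ts (PySem.Str.lower l) with
      | none => chainFind ls ts
      | some rl =>
        match chainFind ls ts with
        | none => some l
        | some v =>
          match PySem.List.index? ts (PySem.Str.lower v) with
          | none => some l
          | some rv => if rl ≤ rv then some l else some v := by
  induction ts with
  | nil =>
    have : PySem.List.index? ([] : List String) (PySem.Str.lower l) = none := by
      simp [PySem.List.index?_eq_idxOf?]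
    rw [this]
    rfl
  | cons t ts ih =>
    by_cases hl : PySem.Str.lower l = t
    · have hfind : chainFind (l :: ls) (t :: ts) = some l := by
        simp [chainFind, List.find?_cons, hl]
      have hidx : PySem.List.index? (t :: ts) (PySem.Str.lower l) = some 0 := by
        rw [hl]; exact PySem.List.index?_cons_self ..
      rw [hfind, hidx]
      cases hc : chainFind ls (t :: ts) with
      | none => rfl
      | some v =>
        simp only []
        cases hrv : PySem.List.index? (t :: ts) (PySem.Str.lower v) with
        | none => simp [hrv]
        | some rv => simp [hrv]
    · have hidx : PySem.List.index? (t :: ts) (PySem.Str.lower l)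
          = (PySem.List.index? ts (PySem.Str.lower l)).map (· + 1) :=
        PySem.List.index?_cons_of_ne _ (fun h => hl h.symm)
      have hfl : chainFind (l :: ls) (t :: ts)
          = match ls.find? (fun x => PySem.Str.lower x == t) with
            | some v => some v
            | none => chainFind (l :: ls) ts := by
        simp [chainFind, List.find?_cons, hl]
      rw [hfl, hidx]
      cases hf : ls.find? (fun x => PySem.Str.lower x == t) with
      | some v =>
        have hv : PySem.Str.lower v = t := by simpa using List.find?_some hf
        have hrv0 : PySem.List.index? (t :: ts) (PySem.Str.lower v) = some 0 := by
          rw [hv]; exact PySem.List.index?_cons_self ..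
        have hcl : chainFind ls (t :: ts) = some v := by simp [chainFind, hf]
        rw [hcl]
        cases hr : PySem.List.index? ts (PySem.Str.lower l) with
        | none => rfl
        | some rl =>
          simp only [Option.map_some, hrv0]
          rw [if_neg (by omega)]
      | none =>
        have hcl : chainFind ls (t :: ts) = chainFind ls ts := by simp [chainFind, hf]
        rw [hcl, ih]
        cases hr : PySem.List.index? ts (PySem.Str.lower l) with
        | none => rfl
        | some rl =>
          simp only [Option.map_some]
          cases hc : chainFind ls ts with
          | none => rfl
          | some v =>
            simp only []
            have hvt : PySem.Str.lower v ≠ t := by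
              intro h
              have := List.find?_eq_none.mp hf v (chainFind_mem ts ls v hc)
              simp [h] at this
            have hrvc : PySem.List.index? (t :: ts) (PySem.Str.lower v)
                = (PySem.List.index? ts (PySem.Str.lower v)).map (· + 1) :=
              PySem.List.index?_cons_of_ne _ (fun h => hvt h.symm)
            cases hrv : PySem.List.index? ts (PySem.Str.lower v) with
            | none => simp only [hrvc, hrv, Option.map_none]
            | some rv =>
              simp only [hrvc, hrv, Option.map_some]
              by_cases hle : rl ≤ rv
              · rw [if_pos hle, if_pos (by omega)]
              · rw [if_neg hle, if_neg (by omega)]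

-- the single-pass min-rank fold computes chainFind, carrying the rank of its result
lemma bFold_eq_chainFind (ts : List String) (ls : List String) :
    (match ls.foldl (fun best l => bMerge best (bSingle ts l)) none with
      | none => chainFind ls ts = none
      | some (r, v) => chainFind ls ts = some v ∧ PySem.List.index? ts (PySem.Str.lower v) = some r : Prop) := by
  induction ls with
  | nil => simpa using chainFind_nil ts
  | cons l ls ih =>
    simp only [List.foldl_cons]
    rw [foldl_bMerge, bMerge_none_left]
    rw [chainFind_cons]
    cases hb : ls.foldl (fun best l => bMerge best (bSingle ts l)) none with
    | none =>
      rw [hb] at ih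
      have ihn : chainFind ls ts = none := ih
      cases hs : PySem.List.index? ts (PySem.Str.lower l) with
      | none => simp only [bSingle, hs, Option.map_none, bMerge, ihn]
      | some rl =>
        simp only [bSingle, hs, Option.map_some, bMerge, ihn]
        exact ⟨trivial, trivial⟩
    | some p =>
      rcases p with ⟨rv, v⟩
      rw [hb] at ih
      have ihp : chainFind ls ts = some v ∧ PySem.List.index? ts (PySem.Str.lower v) = some rv := ih
      obtain ⟨hcv, hrv⟩ := ihp
      cases hs : PySem.List.index? ts (PySem.Str.lower l) with
      | none =>
        simp only [bSingle, hs, Option.map_none, bMerge, hcv]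
        exact ⟨trivial, hrv⟩
      | some rl =>
        simp only [bSingle, hs, Option.map_some, bMerge, hcv, hrv]
        by_cases hlt : rv < rl
        · rw [if_pos hlt, if_neg (by omega)]
          exact ⟨rfl, hrv⟩
        · rw [if_neg hlt, if_pos (by omega)]
          exact ⟨rfl, hs⟩

-- ===== VERDICT (by name: the statement is the Claim_ definition above) =====
theorem resolve_positive_label_spec : Claim_equal_resolve_positive_label := by
  intro labels requested _ hpre
  obtain ⟨-, hnd⟩ := hpre
  unfold Spec_resolve_positive_label resolve_positive_label resolve_positive_label_alt
  -- name the full priority list B uses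
  set base : List String := ["fake", "positive", "true", "1", "yes", "real"] with hbase
  -- rewrite B's fold step into the bMerge form and apply the characterization
  have key : ∀ ts : List String,
      (match labels.foldl (fun best label =>
          match PySem.List.index? ts (PySem.Str.lower label) with
          | none => best
          | some rank =>
            match best with
            | none => some (rank, label)
            | some (br, _) => if rank < br then some (rank, label) else best) none with
        | some (_, v) => v
        | none => (PySem.List.pyGet? labels (-1)).getD "")
      = (match chainFind labels ts with
        | some v => v
        | none => (PySem.List.pyGet? labels (-1)).getD "") := by
    intro ts
    have hstep : (fun (best : Option (Nat × String)) (label : String) =>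
        match PySem.List.index? ts (PySem.Str.lower label) with
        | none => best
        | some rank =>
          match best with
          | none => some (rank, label)
          | some (br, _) => if rank < br then some (rank, label) else best)
        = (fun best label => bMerge best (bSingle ts label)) := by
      funext best label; exact bStep_eq_merge ts best label
    rw [hstep]
    have := bFold_eq_chainFind ts labels
    cases hb : labels.foldl (fun best l => bMerge best (bSingle ts l)) none with
    | none => rw [hb] at this; simp only [this]
    | some p =>
      rcases p with ⟨r, v⟩
      rw [hb] at this
      obtain ⟨hcv, -⟩ := this
      simp only [hcv]
  -- A's dict lookups become find?, its candidate loop becomes chainFind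
  cases requested with
  | none =>
    simp only []
    rw [aCandLoop_eq_chainFind labels _ hnd]
    exact (key base).symm
  | some r =>
    by_cases hr : r = ""
    · simp only [hr, if_pos rfl]
      rw [aCandLoop_eq_chainFind labels _ hnd]
      exact (key base).symm
    · simp only [if_neg hr]
      rw [key ([PySem.Str.lower r] ++ base)]
      rw [show ([PySem.Str.lower r] ++ base) = PySem.Str.lower r :: base from rfl]
      rw [aCandLoop_eq_chainFind labels _ hnd, dict_get?_eq_find? labels _ hnd]
      cases hf : labels.find? (fun l => PySem.Str.lower l == PySem.Str.lower r) with
      | some v => simp only [chainFind, hf]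
      | none => simp only [chainFind, hf]
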